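-- pv_equiv track=rewrite | github.com/owais-ch/Arrays | absolute_discount_count.py | distinctCount
-- ===== SOURCE A (Python) =====
-- def distinctCount(arr, n):
--     j=1
--
--     for i in range(1,n):
--         if arr[i]!=arr[i-1]:
--             arr[j]=arr[i]
--             j+=1
--
--     arr=arr[:j]
--     n=len(arr)
--     count=n
--
--     i,j=0,n-1
--
--     while i<j:
--         if abs(arr[i])==abs(arr[j]):
--             count-=1
--             if (i+1<n and arr[i+1]==arr[i]) and (j-1>=0 and arr[j-1]!=arr[j]):
--                 i+=1
--             elif (i+1<n and arr[i+1]!=arr[i]) and (j-1>=0 and arr[j-1]==arr[j]):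
--                 j-=1
--             else:
--                 i+=1
--                 j-=1
--         elif abs(arr[i])>abs(arr[j]):
--             i+=1
--         elif abs(arr[i])<abs(arr[j]):
--             j-=1
--
--     return count
-- ===== SOURCE B (Python) =====
-- def distinctCount(arr, n):
--     # same in-place adjacent dedup as A (mutates arr the same way), then a set of
--     # absolute values replaces A's two-pointer scan
--     j = 1
--     for i in range(1, n):
--         if arr[i] != arr[i-1]:
--             arr[j] = arr[i]
--             j += 1
--     return len({abs(x) for x in arr[:j]})
-- ===== Notes on version B (the rewrite author's own statement) =====
-- stated objective: idiomatic
-- what changed: The counting phase is replaced: instead of A's inward two-pointer scan with count decrements, B collects the absolute values of the deduped prefix into a set and returns its size; the in-place dedup loop (and its mutation of arr) is kept identical. Pre_ requires n <= len(arr) (A raises IndexError otherwise) and that the first n elements are sorted nondecreasing, the function's stated domain: on unsorted input A's two-pointer count is an accident of pointer movement that a set of magnitudes cannot and should not match.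
-- outside the precondition, e.g. on distinctCount([1, 2, 1, 2], 4): A returns 3, B returns 2
import Mathlib
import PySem

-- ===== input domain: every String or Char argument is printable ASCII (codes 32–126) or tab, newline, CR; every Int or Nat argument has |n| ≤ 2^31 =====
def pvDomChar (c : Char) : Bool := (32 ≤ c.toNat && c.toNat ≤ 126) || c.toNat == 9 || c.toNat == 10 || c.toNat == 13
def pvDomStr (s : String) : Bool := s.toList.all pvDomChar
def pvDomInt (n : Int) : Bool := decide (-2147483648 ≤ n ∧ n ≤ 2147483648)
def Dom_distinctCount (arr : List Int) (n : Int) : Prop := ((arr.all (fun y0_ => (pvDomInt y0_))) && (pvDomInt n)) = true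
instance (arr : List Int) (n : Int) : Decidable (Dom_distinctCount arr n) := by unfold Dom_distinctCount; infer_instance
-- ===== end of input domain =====

-- B keeps A's in-place dedup loop (so it mutates arr exactly as A does) and replaces the
-- two-pointer counting scan with a set of absolute values; equivalence is about the return value.

-- ===== PORT A =====
-- the dedup loop body, shared verbatim by Source A and Source B: reads arr[i], arr[i-1], writes arr[j]
def pvDedupStep (st : List Int × Int) (i : Int) : List Int × Int :=
  if PySem.List.pyGetD st.1 i 0 ≠ PySem.List.pyGetD st.1 (i - 1) 0 then
    (PySem.List.pySetD st.1 st.2 (PySem.List.pyGetD st.1 i 0), st.2 + 1)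
  else st

-- the while-loop of A; the trailing else is Python's 'elif abs(arr[i])<abs(arr[j])'
-- (by trichotomy it is reached exactly when that condition holds)
def pvTwoPtr (a : List Int) (nn : Int) (i j count : Int) : Int :=
  if i < j then
    if |PySem.List.pyGetD a i 0| = |PySem.List.pyGetD a j 0| then
      if (i + 1 < nn ∧ PySem.List.pyGetD a (i + 1) 0 = PySem.List.pyGetD a i 0) ∧
         (j - 1 ≥ 0 ∧ PySem.List.pyGetD a (j - 1) 0 ≠ PySem.List.pyGetD a j 0) then
        pvTwoPtr a nn (i + 1) j (count - 1)
      else if (i + 1 < nn ∧ PySem.List.pyGetD a (i + 1) 0 ≠ PySem.List.pyGetD a i 0) ∧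
              (j - 1 ≥ 0 ∧ PySem.List.pyGetD a (j - 1) 0 = PySem.List.pyGetD a j 0) then
        pvTwoPtr a nn i (j - 1) (count - 1)
      else
        pvTwoPtr a nn (i + 1) (j - 1) (count - 1)
    else if |PySem.List.pyGetD a i 0| > |PySem.List.pyGetD a j 0| then
      pvTwoPtr a nn (i + 1) j count
    else
      pvTwoPtr a nn i (j - 1) count
  else count
termination_by (j - i).toNat
decreasing_by all_goals omega

def distinctCount (arr : List Int) (n : Int) : Int :=
  let st := (PySem.List.pyRange 1 n 1).foldl pvDedupStep (arr, 1)
  let a := PySem.List.slice st.1 none (some st.2)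
  let nn := ((a.length : Int))
  pvTwoPtr a nn 0 (nn - 1) nn

-- ===== PORT B =====
def distinctCount_alt (arr : List Int) (n : Int) : Int :=
  let st := (PySem.List.pyRange 1 n 1).foldl pvDedupStep (arr, 1)
  let a := PySem.List.slice st.1 none (some st.2)
  ((PySem.Set.ofList (a.map (fun x => |x|))).length : Int)

-- ===== PRECONDITION & SPEC =====
-- Pre_ excludes (a) n > len(arr), where A raises IndexError, and (b) inputs whose first n
-- elements are not sorted nondecreasing: there A still returns, but the value is an accident
-- of two-pointer movement over data outside the algorithm's domain ("count distinct absolute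
-- values in a SORTED array"), e.g. A returns 3 on ([1,2,1,2],4) where B returns 2.
def Pre_distinctCount (arr : List Int) (n : Int) : Prop :=
  n ≤ (arr.length : Int) ∧ (arr.take n.toNat).Pairwise (· ≤ ·)
instance (arr : List Int) (n : Int) : Decidable (Pre_distinctCount arr n) := by
  unfold Pre_distinctCount; infer_instance

def pvWitness_distinctCount : List Int × Int := ([-4, -2, -1, 2, 4, 4, 7], 7)

def Spec_distinctCount (arr : List Int) (n : Int) (out : Int) : Prop := out = distinctCount_alt arr n
instance (arr : List Int) (n : Int) (out : Int) : Decidable (Spec_distinctCount arr n out) := by unfold Spec_distinctCount; infer_instance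

-- ===== CLAIM (what is proved, stated in full; the proofs are below) =====
def Claim_equal_distinctCount : Prop := ∀ (arr : List Int) (n : Int), Dom_distinctCount arr n → Pre_distinctCount arr n → Spec_distinctCount arr n (distinctCount arr n)

-- ===== LEMMAS AND PROOFS =====

-- adjacent dedup where p is the previous original element (= last kept element)
def pvDD (p : Int) : List Int → List Int
  | [] => []
  | x :: t => if x ≠ p then x :: pvDD x t else pvDD p t

-- the full adjacent dedup that the loop builds in arr[:j]
def pvD : List Int → List Int
  | [] => []
  | x :: t => x :: pvDD x t

-- number of elements whose negation is also in the list, counted on the negative member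
def pvPC (l : List Int) : Nat := (l.filter (fun v => decide (v < 0 ∧ -v ∈ l))).length

-- the contiguous segment arr[i..j] the two-pointer loop still has to examine
def pvSeg (l : List Int) (i j : Int) : List Int := (l.take (j + 1).toNat).drop i.toNat

theorem pvSeg_cast (l : List Int) (i j : Int) (I T : Nat) (h1 : i.toNat = I)
    (h2 : (j + 1).toNat = T) : pvSeg l i j = (l.take T).drop I := by
  unfold pvSeg; rw [h1, h2]

theorem pvPC_le (l : List Int) : pvPC l ≤ l.length := by
  simpa [pvPC] using List.length_filter_le _ l

theorem pvPC_nil : pvPC [] = 0 := rfl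

theorem pvPC_singleton (x : Int) : pvPC [x] = 0 := by
  simp only [pvPC, List.filter, List.mem_singleton]
  have : ¬ (x < 0 ∧ -x = x) := by rintro ⟨h1, h2⟩; omega
  simp [this]

theorem pvPC_cons (x : Int) (t : List Int) (hx : ∀ v ∈ t, x < v) :
    pvPC (x :: t) = (if x < 0 ∧ -x ∈ t then 1 else 0) + pvPC t := by
  unfold pvPC
  rw [List.filter_cons]
  have hhead : (decide (x < 0 ∧ -x ∈ x :: t)) = (decide (x < 0 ∧ -x ∈ t)) := by
    simp only [decide_eq_decide, List.mem_cons]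
    constructor
    · rintro ⟨h1, h2 | h2⟩
      · omega
      · exact ⟨h1, h2⟩
    · rintro ⟨h1, h2⟩; exact ⟨h1, Or.inr h2⟩
  have htail : t.filter (fun v => decide (v < 0 ∧ -v ∈ x :: t))
      = t.filter (fun v => decide (v < 0 ∧ -v ∈ t)) := by
    apply List.filter_congr
    intro v hv
    simp only [decide_eq_decide, List.mem_cons]
    constructor
    · rintro ⟨h1, h2 | h2⟩
      · exact absurd h2 (by have := hx v hv; omega)
      · exact ⟨h1, h2⟩
    · rintro ⟨h1, h2⟩; exact ⟨h1, Or.inr h2⟩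
  rw [hhead, htail]
  by_cases h : x < 0 ∧ -x ∈ t <;> simp [h] <;> omega

theorem pvPC_snoc' (t : List Int) (y : Int) (hy : ∀ v ∈ t, v < y) (hny : -y ∉ t) :
    pvPC (t ++ [y]) = pvPC t := by
  unfold pvPC
  rw [List.filter_append]
  have hlast : ([y].filter (fun v => decide (v < 0 ∧ -v ∈ t ++ [y]))) = [] := by
    simp only [List.filter, List.mem_append, List.mem_singleton]
    have : ¬ (y < 0 ∧ (-y ∈ t ∨ -y = y)) := by
      rintro ⟨h1, h2 | h2⟩
      · exact hny h2
      · omega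
    simp [this]
  have hmain : t.filter (fun v => decide (v < 0 ∧ -v ∈ t ++ [y]))
      = t.filter (fun v => decide (v < 0 ∧ -v ∈ t)) := by
    apply List.filter_congr
    intro v hv
    simp only [decide_eq_decide, List.mem_append, List.mem_singleton]
    constructor
    · rintro ⟨h1, h2 | h2⟩
      · exact ⟨h1, h2⟩
      · exfalso
        apply hny
        have hveq : v = -y := by omega
        rwa [hveq] at hv
    · rintro ⟨h1, h2⟩; exact ⟨h1, Or.inl h2⟩
  rw [hlast, hmain, List.append_nil]

theorem pvDD_pairwise {p : Int} {t : List Int} (h : (p :: t).Pairwise (· ≤ ·)) :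
    (p :: pvDD p t).Pairwise (· < ·) := by
  induction t generalizing p with
  | nil => simp [pvDD]
  | cons x t ih =>
    rcases List.pairwise_cons.mp h with ⟨hple, hxt⟩
    by_cases hxp : x = p
    · subst hxp
      simp only [pvDD, ne_eq, not_true_eq_false, ite_false]
      have : (x :: t).Pairwise (· ≤ ·) := hxt
      simpa [pvDD] using ih this
    · have hplt : p < x := lt_of_le_of_ne (hple x (List.mem_cons_self)) (Ne.symm hxp)
      simp only [pvDD, if_pos hxp]
      have hrec := ih hxt
      rw [List.pairwise_cons]
      refine ⟨?_, by simpa [pvDD, hxp] using hrec⟩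
      intro v hv
      rcases List.mem_cons.mp (by simpa [pvDD, hxp] using hv) with h1 | h1
      · omega
      · have := (List.pairwise_cons.mp hrec).1 v h1
        omega

theorem pvDD_append (t : List Int) (p v : Int) :
    pvDD p (t ++ [v]) = pvDD p t ++ (if v = t.getLastD p then [] else [v]) := by
  induction t generalizing p with
  | nil => by_cases h : v = p <;> simp [pvDD, h]
  | cons x t ih =>
    simp only [List.cons_append, pvDD, List.getLastD_cons]
    by_cases hxp : x = p
    · subst hxp; simp [ih]
    · simp [hxp, ih]

theorem list_getLastD_eq (l : List Int) (d : Int) (h : 0 < l.length) :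
    l.getLastD d = l[l.length - 1]'(by omega) := by
  induction l generalizing d with
  | nil => simp at h
  | cons x t ih =>
    cases t with
    | nil => simp
    | cons y s =>
      rw [List.getLastD_cons, ih x (by simp)]
      show (y :: s)[s.length]'(by simp) = (x :: y :: s)[s.length + 1]'(by simp)
      rw [List.getElem_cons_succ]
      rfl

-- pvD over a snoc, compared against the ORIGINAL last element (as the loop does)
theorem pvD_append (L : List Int) (v : Int) (hL : L ≠ []) :
    pvD (L ++ [v]) = pvD L ++ (if v = L.getLastD 0 then [] else [v]) := by
  cases L with
  | nil => exact absurd rfl hL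
  | cons x t => simp only [List.cons_append, pvD, pvDD_append, List.getLastD_cons]

-- a List.set at an index below the drop point, or writing back the value already there,
-- leaves every suffix from k on unchanged
theorem drop_set_eq (l : List Int) (m k : Nat) (v : Int)
    (h : m < k ∨ (∃ hm : m < l.length, v = l[m])) : (l.set m v).drop k = l.drop k := by
  apply List.ext_getElem
  · simp
  · intro i h1 h2
    rw [List.getElem_drop, List.getElem_drop, List.getElem_set]
    by_cases hmk : m = k + i
    · rw [if_pos hmk]
      rcases h with h | ⟨hm, hv⟩
      · omega
      · subst hmk
        exact hv
    · rw [if_neg hmk]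

theorem take_succ_set (l : List Int) (j : Nat) (v : Int) (h : j < l.length) :
    (l.set j v).take (j + 1) = l.take j ++ [v] := by
  have h1 : (l.set j v).take (j + 1)
      = (l.set j v).take j ++ [(l.set j v)[j]'(by simp; omega)] := by
    rw [List.take_succ, List.getElem?_eq_getElem (by simp; omega)]
    rfl
  rw [h1, List.getElem_set, if_pos rfl]
  congr 1
  apply List.ext_getElem
  · simp
  · intro i hi1 hi2
    rw [List.getElem_take, List.getElem_set, if_neg (by simp at hi1; omega), List.getElem_take]

-- ===== characterisation of the dedup loop =====
theorem dedup_loop (arr : List Int) (k : Nat) (hk1 : 1 ≤ k) (hk : k ≤ arr.length) :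
    ∃ (a : List Int) (j : Nat),
      (PySem.List.pyRange 1 (k : Int) 1).foldl pvDedupStep (arr, 1) = (a, (j : Int)) ∧
      a.length = arr.length ∧ 1 ≤ j ∧ j ≤ k ∧
      a.take j = pvD (arr.take k) ∧ a.drop (k - 1) = arr.drop (k - 1) := by
  induction k with
  | zero => omega
  | succ k ih =>
    by_cases hk0 : k = 0
    · subst hk0
      refine ⟨arr, 1, ?_, rfl, le_refl 1, le_refl 1, ?_, by simp⟩
      · have : PySem.List.pyRange 1 ((1 : Nat) : Int) 1 = [] := by
          apply List.eq_nil_iff_forall_not_mem.mpr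
          intro x hx
          have := PySem.List.mem_pyRange_one.mp hx
          omega
        rw [this]; rfl
      · cases arr with
        | nil => simp at hk
        | cons x t => simp [pvD, pvDD]
    · have hk1' : 1 ≤ k := by omega
      have hklen : k < arr.length := by omega
      obtain ⟨a, j, hfold, hlen, hj1, hjk, htake, hdrop⟩ := ih hk1' (by omega)
      have hrange : PySem.List.pyRange 1 ((k + 1 : Nat) : Int) 1
          = PySem.List.pyRange 1 (k : Int) 1 ++ [(k : Int)] := by
        have hcast : ((k + 1 : Nat) : Int) = (k : Int) + 1 := by push_cast; ring
        rw [hcast]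
        exact PySem.List.pyRange_one_succ_right (by omega)
      rw [hrange, List.foldl_append, hfold]
      simp only [List.foldl_cons, List.foldl_nil]
      -- the two reads of the loop body see the original array
      have hread : ∀ m : Nat, k - 1 ≤ m → (hm : m < arr.length) → a[m]'(by omega) = arr[m] := by
        intro m hm1 hm2
        have h1 : (a.drop (k-1))[m - (k-1)]'(by rw [List.length_drop, hlen]; omega)
            = (arr.drop (k-1))[m - (k-1)]'(by rw [List.length_drop]; omega) := by
          simp only [hdrop]
        simp only [List.getElem_drop] at h1
        have he : k - 1 + (m - (k - 1)) = m := by omega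
        convert h1 using 2 <;> omega
      have hak : a[k]'(by omega) = arr[k] := hread k (by omega) hklen
      have hak1 : a[k-1]'(by omega) = arr[k-1]'(by omega) := hread (k-1) (by omega) (by omega)
      have hget_k : PySem.List.pyGetD a ((k : Int)) 0 = arr[k] := by
        rw [PySem.List.pyGetD_natCast, List.getD_eq_getElem a 0 (by omega), hak]
      have hget_k1 : PySem.List.pyGetD a ((k : Int) - 1) 0 = arr[k-1]'(by omega) := by
        have hc : (k : Int) - 1 = ((k - 1 : Nat) : Int) := by omega
        rw [hc, PySem.List.pyGetD_natCast, List.getD_eq_getElem a 0 (by omega), hak1]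
      have hlast : (arr.take k).getLastD 0 = arr[k-1]'(by omega) := by
        rw [list_getLastD_eq (arr.take k) 0 (by simp; omega), List.getElem_take]
        congr 1
        simp
        omega
      have htk : arr.take (k + 1) = arr.take k ++ [arr[k]] := by
        rw [List.take_succ]
        congr 1
        rw [List.getElem?_eq_getElem hklen]
        rfl
      have htknil : arr.take k ≠ [] := by
        have hlen' : (arr.take k).length = k := by rw [List.length_take]; omega
        intro hcon
        rw [hcon] at hlen'
        simp at hlen'
        omega
      unfold pvDedupStep
      dsimp only
      rw [hget_k, hget_k1]
      by_cases hne : arr[k] ≠ arr[k-1]'(by omega)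
      · rw [if_pos hne]
        refine ⟨a.set j arr[k], j + 1, ?_, by simp [hlen], by omega, by omega, ?_, ?_⟩
        · rw [show ((j : Int)) + 1 = ((j + 1 : Nat) : Int) from by omega,
            PySem.List.pySetD_natCast]
        · rw [take_succ_set a j arr[k] (by omega), htake, htk,
            pvD_append _ _ htknil, hlast, if_neg hne]
        · have hset : (a.set j arr[k]).drop (k + 1 - 1) = a.drop k := by
            apply drop_set_eq
            by_cases hjk' : j < k
            · exact Or.inl hjk'
            · have hjeq : j = k := by omega
              subst hjeq
              exact Or.inr ⟨by omega, hak.symm⟩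
          rw [hset]
          have hd : a.drop k = (a.drop (k-1)).tail := by rw [List.tail_drop]; congr 1; omega
          rw [hd, hdrop, List.tail_drop]
          congr 1
          omega
      · rw [if_neg hne]
        refine ⟨a, j, rfl, hlen, hj1, by omega, ?_, ?_⟩
        · rw [htake, htk, pvD_append _ _ htknil, hlast, if_pos (by omega), List.append_nil]
        · have hd : a.drop (k + 1 - 1) = (a.drop (k-1)).tail := by
            rw [List.tail_drop]; congr 1; omega
          rw [hd, hdrop, List.tail_drop]
          congr 1
          omega

-- ===== segment lemmas =====
theorem seg_mem' (l : List Int) (I T : Nat) {v : Int} (hv : v ∈ (l.take T).drop I) :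
    ∃ m, I ≤ m ∧ m < T ∧ ∃ hm : m < l.length, v = l[m] := by
  obtain ⟨kk, hkk, he⟩ := List.mem_iff_getElem.mp hv
  simp only [List.getElem_drop, List.getElem_take] at he
  have hlen : ((l.take T).drop I).length = min T l.length - I := by simp
  rw [hlen] at hkk
  exact ⟨I + kk, by omega, by omega, by omega, he.symm⟩

theorem seg_cons (l : List Int) (I J : Nat) (h1 : I ≤ J) (h2 : J < l.length) :
    (l.take (J + 1)).drop I = l[I]'(by omega) :: (l.take (J + 1)).drop (I + 1) := by
  have hI : I < (l.take (J + 1)).length := by simp; omega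
  rw [List.drop_eq_getElem_cons hI, List.getElem_take]

theorem seg_snoc (l : List Int) (I J : Nat) (h1 : I ≤ J) (h2 : J < l.length) :
    (l.take (J + 1)).drop I = (l.take J).drop I ++ [l[J]] := by
  have ht : l.take (J + 1) = l.take J ++ [l[J]] := by
    rw [List.take_succ]
    congr 1
    rw [List.getElem?_eq_getElem h2]
    rfl
  rw [ht, List.drop_append_of_le_length (by simp; omega)]

-- ===== the two-pointer loop counts |seg| minus the number of (v, -v) pairs =====
theorem pvTwoPtr_eq (l : List Int) (hl : l.Pairwise (· < ·)) (m : Nat) :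
    ∀ (i j count : Int), (j - i).toNat ≤ m → 0 ≤ i → j < (l.length : Int) →
      pvTwoPtr l (l.length : Int) i j count = count - (pvPC (pvSeg l i j) : Int) := by
  have mono : ∀ (p q : Nat) (_ : p < q) (hq : q < l.length), l[p]'(by omega) < l[q] := by
    intro p q hpq hq
    exact List.pairwise_iff_getElem.mp hl p q (by omega) hq hpq
  induction m with
  | zero =>
    intro i j count hm h0 hj
    have hij : ¬ i < j := by omega
    rw [pvTwoPtr, if_neg hij]
    have hle : (pvSeg l i j).length ≤ 1 := by
      unfold pvSeg
      simp
      omega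
    interval_cases h : (pvSeg l i j).length
    · rw [List.eq_nil_of_length_eq_zero h, pvPC_nil]; ring
    · obtain ⟨x, hx⟩ := List.length_eq_one_iff.mp h
      rw [hx, pvPC_singleton]; ring
  | succ m ih =>
    intro i j count hm h0 hj
    by_cases hij : i < j
    case neg =>
      rw [pvTwoPtr, if_neg hij]
      have hle : (pvSeg l i j).length ≤ 1 := by
        unfold pvSeg
        simp
        omega
      interval_cases h : (pvSeg l i j).length
      · rw [List.eq_nil_of_length_eq_zero h, pvPC_nil]; ring
      · obtain ⟨x, hx⟩ := List.length_eq_one_iff.mp h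
        rw [hx, pvPC_singleton]; ring
    case pos =>
      obtain ⟨I, rfl⟩ : ∃ I : Nat, i = (I : Int) := ⟨i.toNat, by omega⟩
      obtain ⟨J, rfl⟩ : ∃ J : Nat, j = (J : Int) := ⟨j.toNat, by omega⟩
      have hIJ : I < J := by omega
      have hJl : J < l.length := by omega
      have hgi : PySem.List.pyGetD l (I : Int) 0 = l[I]'(by omega) := by
        rw [PySem.List.pyGetD_natCast, List.getD_eq_getElem l 0 (by omega)]
      have hgj : PySem.List.pyGetD l (J : Int) 0 = l[J] := by
        rw [PySem.List.pyGetD_natCast, List.getD_eq_getElem l 0 (by omega)]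
      have hlt : l[I]'(by omega) < l[J] := mono I J hIJ hJl
      have haI := abs_choice (l[I]'(by omega))
      have haI0 := abs_nonneg (l[I]'(by omega))
      have haJ := abs_choice (l[J])
      have haJ0 := abs_nonneg (l[J])
      have hs0 : pvSeg l (I : Int) (J : Int) = (l.take (J + 1)).drop I :=
        pvSeg_cast _ _ _ _ _ (by omega) (by omega)
      have hs1 : pvSeg l ((I : Int) + 1) (J : Int) = (l.take (J + 1)).drop (I + 1) :=
        pvSeg_cast _ _ _ _ _ (by omega) (by omega)
      have hs2 : pvSeg l ((I : Int) + 1) ((J : Int) - 1) = (l.take J).drop (I + 1) :=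
        pvSeg_cast _ _ _ _ _ (by omega) (by omega)
      have hs3 : pvSeg l (I : Int) ((J : Int) - 1) = (l.take J).drop I :=
        pvSeg_cast _ _ _ _ _ (by omega) (by omega)
      have hbr1 : ¬ (((I : Int) + 1 < (l.length : Int) ∧
            PySem.List.pyGetD l ((I : Int) + 1) 0 = l[I]'(by omega)) ∧
          ((J : Int) - 1 ≥ 0 ∧ PySem.List.pyGetD l ((J : Int) - 1) 0 ≠ l[J])) := by
        rintro ⟨⟨hlt1, heq1⟩, -⟩
        rw [show (I : Int) + 1 = ((I + 1 : Nat) : Int) from by omega,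
          PySem.List.pyGetD_natCast, List.getD_eq_getElem l 0 (by omega)] at heq1
        have := mono I (I + 1) (by omega) (by omega)
        omega
      have hbr2 : ¬ (((I : Int) + 1 < (l.length : Int) ∧
            PySem.List.pyGetD l ((I : Int) + 1) 0 ≠ l[I]'(by omega)) ∧
          ((J : Int) - 1 ≥ 0 ∧ PySem.List.pyGetD l ((J : Int) - 1) 0 = l[J])) := by
        rintro ⟨-, ⟨hge, heq2⟩⟩
        rw [show (J : Int) - 1 = ((J - 1 : Nat) : Int) from by omega,
          PySem.List.pyGetD_natCast, List.getD_eq_getElem l 0 (by omega)] at heq2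
        have := mono (J - 1) J (by omega) hJl
        omega
      have hcons : (l.take (J + 1)).drop I = l[I]'(by omega) :: (l.take (J + 1)).drop (I + 1) :=
        seg_cons l I J (by omega) hJl
      have hup : ∀ v ∈ (l.take (J + 1)).drop (I + 1), l[I]'(by omega) < v ∧ v ≤ l[J] := by
        intro v hv
        obtain ⟨mm, h1, h2, h3, he⟩ := seg_mem' l (I + 1) (J + 1) hv
        subst he
        refine ⟨mono I mm (by omega) h3, ?_⟩
        rcases Nat.lt_or_ge mm J with hc | hc
        · exact le_of_lt (mono mm J hc hJl)
        · have hmJ : mm = J := by omega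
          subst hmJ
          exact le_refl _
      rw [pvTwoPtr, if_pos hij, hgi, hgj]
      by_cases habs : |l[I]'(by omega)| = |l[J]|
      · rw [if_pos habs, if_neg hbr1, if_neg hbr2,
          ih ((I : Int) + 1) ((J : Int) - 1) (count - 1) (by omega) (by omega) (by omega)]
        have hpair : l[I]'(by omega) = -l[J] ∧ 0 < l[J] := by
          rcases haI with h | h <;> rcases haJ with h' | h' <;> omega
        have hsnoc : (l.take (J + 1)).drop (I + 1) = (l.take J).drop (I + 1) ++ [l[J]] :=
          seg_snoc l (I + 1) J (by omega) hJl
        have hmid : ∀ v ∈ (l.take J).drop (I + 1), l[I]'(by omega) < v ∧ v < l[J] := by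
          intro v hv
          obtain ⟨mm, h1, h2, h3, he⟩ := seg_mem' l (I + 1) J hv
          subst he
          exact ⟨mono I mm (by omega) h3, mono mm J (by omega) hJl⟩
        have hpc : pvPC (pvSeg l (I : Int) (J : Int))
            = 1 + pvPC (pvSeg l ((I : Int) + 1) ((J : Int) - 1)) := by
          rw [hs0, hs2, hcons, pvPC_cons _ _ (fun v hv => (hup v hv).1), hsnoc,
            pvPC_snoc' _ _ (fun v hv => (hmid v hv).2)
              (by intro hmem; have := (hmid _ hmem).1; omega),
            if_pos ⟨by omega, by
              rw [List.mem_append]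
              exact Or.inr (by rw [List.mem_singleton]; omega)⟩]
        rw [hpc]
        push_cast
        ring
      · rw [if_neg habs]
        by_cases hgt : |l[I]'(by omega)| > |l[J]|
        · rw [if_pos hgt,
            ih ((I : Int) + 1) (J : Int) count (by omega) (by omega) (by omega)]
          have hpc : pvPC (pvSeg l (I : Int) (J : Int))
              = pvPC (pvSeg l ((I : Int) + 1) (J : Int)) := by
            rw [hs0, hs1, hcons, pvPC_cons _ _ (fun v hv => (hup v hv).1), if_neg ?_,
              Nat.zero_add]
            rintro ⟨hneg, hmem⟩
            have := (hup _ hmem).2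
            rcases haI with h | h <;> rcases haJ with h' | h' <;> omega
          rw [hpc]
        · rw [if_neg hgt,
            ih (I : Int) ((J : Int) - 1) count (by omega) (by omega) (by omega)]
          have hsnoc : (l.take (J + 1)).drop I = (l.take J).drop I ++ [l[J]] :=
            seg_snoc l I J (by omega) hJl
          have hlow : ∀ v ∈ (l.take J).drop I, l[I]'(by omega) ≤ v ∧ v < l[J] := by
            intro v hv
            obtain ⟨mm, h1, h2, h3, he⟩ := seg_mem' l I J hv
            subst he
            refine ⟨?_, mono mm J (by omega) hJl⟩
            rcases Nat.lt_or_ge I mm with hc | hc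
            · exact le_of_lt (mono I mm hc h3)
            · have hmI : mm = I := by omega
              subst hmI
              exact le_refl _
          have hpc : pvPC (pvSeg l (I : Int) (J : Int))
              = pvPC (pvSeg l (I : Int) ((J : Int) - 1)) := by
            rw [hs0, hs3, hsnoc]
            apply pvPC_snoc'
            · exact fun v hv => (hlow v hv).2
            · intro hmem
              have hb := (hlow _ hmem).1
              have hb2 := (hlow _ hmem).2
              rcases haI with h | h <;> rcases haJ with h' | h' <;> omega
          rw [hpc]

-- ===== the set of absolute values has |l| - pvPC l elements =====
theorem ofList_length_eq_card (L : List Int) :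
    (PySem.Set.ofList L).length = L.toFinset.card := by
  rw [← List.toFinset_card_of_nodup (PySem.Set.nodup_ofList L)]
  congr 1
  apply Finset.ext
  intro v
  simp [List.mem_toFinset, PySem.Set.mem_ofList]

theorem abs_card (l : List Int) (hl : l.Pairwise (· < ·)) :
    (l.map (fun x => |x|)).toFinset.card = l.length - pvPC l := by
  induction l with
  | nil => simp [pvPC_nil]
  | cons x t ih =>
    rcases List.pairwise_cons.mp hl with ⟨hx, ht⟩
    have hmem_iff : |x| ∈ (t.map (fun x => |x|)).toFinset ↔ (x < 0 ∧ -x ∈ t) := by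
      simp only [List.mem_toFinset, List.mem_map]
      constructor
      · rintro ⟨y, hy, he⟩
        rcases abs_eq_abs.mp he.symm with h | h
        · exact absurd h (by have := hx y hy; omega)
        · have hlt := hx y hy
          refine ⟨by omega, by simpa [show -x = y from by omega] using hy⟩
      · rintro ⟨h1, h2⟩
        exact ⟨-x, h2, by rw [abs_neg]⟩
    rw [List.map_cons, List.toFinset_cons, pvPC_cons x t hx]
    have hle := pvPC_le t
    by_cases hc : x < 0 ∧ -x ∈ t
    · rw [Finset.card_insert_of_mem (hmem_iff.mpr hc), ih ht, if_pos hc]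
      simp only [List.length_cons]
      omega
    · rw [Finset.card_insert_of_notMem (fun hmm => hc (hmem_iff.mp hmm)), ih ht, if_neg hc]
      simp only [List.length_cons]
      omega

-- the common final step: on a strictly increasing array the two phases agree
theorem final_eq (a : List Int) (ha : a.Pairwise (· < ·)) :
    pvTwoPtr a (a.length : Int) 0 ((a.length : Int) - 1) (a.length : Int)
      = ((PySem.Set.ofList (a.map (fun x => |x|))).length : Int) := by
  have h1 := pvTwoPtr_eq a ha (((a.length : Int) - 1 - 0).toNat) 0 ((a.length : Int) - 1)
    (a.length : Int) (le_refl _) (by omega) (by omega)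
  have hseg : pvSeg a 0 ((a.length : Int) - 1) = a := by
    unfold pvSeg
    rw [show ((a.length : Int) - 1 + 1).toNat = a.length from by omega]
    simp
  rw [h1, hseg, ofList_length_eq_card (a.map (fun x => |x|)), abs_card a ha,
    Nat.cast_sub (pvPC_le a)]

-- ===== VERDICT (by name: the statement is the Claim_ definition above) =====
theorem distinctCount_spec : Claim_equal_distinctCount := by
  intro arr n hdom hpre
  obtain ⟨hn, hsort⟩ := hpre
  simp only [Spec_distinctCount, distinctCount, distinctCount_alt]
  by_cases h1 : 1 ≤ n
  · obtain ⟨k, rfl⟩ : ∃ k : Nat, n = (k : Int) := ⟨n.toNat, by omega⟩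
    have hsort' : (arr.take k).Pairwise (· ≤ ·) := by simpa using hsort
    have hk1 : 1 ≤ k := by omega
    have hklen : k ≤ arr.length := by omega
    obtain ⟨a, j, hfold, hlen, hj1, hjk, htake, hdrop⟩ := dedup_loop arr k hk1 hklen
    rw [hfold]
    dsimp only
    rw [PySem.List.slice_to_natCast a j, htake]
    have hpw : (pvD (arr.take k)).Pairwise (· < ·) := by
      have hlen' : (arr.take k).length = k := by rw [List.length_take]; omega
      cases he : arr.take k with
      | nil => rw [he] at hlen'; simp at hlen'; omega
      | cons x t =>
        have hp : (x :: t).Pairwise (· ≤ ·) := he ▸ hsort'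
        simpa [pvD] using pvDD_pairwise hp
    exact final_eq (pvD (arr.take k)) hpw
  · have hempty : PySem.List.pyRange 1 n 1 = [] := by
      apply List.eq_nil_iff_forall_not_mem.mpr
      intro x hx
      have := PySem.List.mem_pyRange_one.mp hx
      omega
    rw [hempty]
    dsimp only [List.foldl_nil]
    rw [show ((1 : Int)) = ((1 : Nat) : Int) from rfl, PySem.List.slice_to_natCast arr 1]
    have hpw : (arr.take 1).Pairwise (· < ·) := by
      cases arr with
      | nil => simp
      | cons x t => simp
    exact final_eq (arr.take 1) hpw
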